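-- pv_equiv track=rewrite | github.com/luiztauffer/alyx | alyx/actions/views.py | _merge_lists_dicts
-- ===== SOURCE A (Python) =====
-- import itertools
-- from operator import itemgetter
--
-- def _merge_lists_dicts(la, lb, key):
--     lst = sorted(itertools.chain(la, lb), key=itemgetter(key))
--     out = []
--     for k, v in itertools.groupby(lst, key=itemgetter(key)):
--         d = {}
--         for dct in v:
--             d.update(dct)
--         out.append(d)
--     return out
-- ===== SOURCE B (Python) =====
-- def _merge_lists_dicts(la, lb, key):
--     alld = list(la) + list(lb)
--     out = []
--     for k in sorted({d[key] for d in alld}):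
--         m = {}
--         for d in alld:
--             if d[key] == k:
--                 m.update(d)
--         out.append(m)
--     return out
-- ===== Notes on version B (the rewrite author's own statement) =====
-- stated objective: alternative
-- what changed: B never sorts or groups the dict list: it collects the distinct key values, sorts only those, and for each key merges the matching dicts of la+lb in original order, replacing A's global stable sort + itertools.groupby pass.
import Mathlib
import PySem

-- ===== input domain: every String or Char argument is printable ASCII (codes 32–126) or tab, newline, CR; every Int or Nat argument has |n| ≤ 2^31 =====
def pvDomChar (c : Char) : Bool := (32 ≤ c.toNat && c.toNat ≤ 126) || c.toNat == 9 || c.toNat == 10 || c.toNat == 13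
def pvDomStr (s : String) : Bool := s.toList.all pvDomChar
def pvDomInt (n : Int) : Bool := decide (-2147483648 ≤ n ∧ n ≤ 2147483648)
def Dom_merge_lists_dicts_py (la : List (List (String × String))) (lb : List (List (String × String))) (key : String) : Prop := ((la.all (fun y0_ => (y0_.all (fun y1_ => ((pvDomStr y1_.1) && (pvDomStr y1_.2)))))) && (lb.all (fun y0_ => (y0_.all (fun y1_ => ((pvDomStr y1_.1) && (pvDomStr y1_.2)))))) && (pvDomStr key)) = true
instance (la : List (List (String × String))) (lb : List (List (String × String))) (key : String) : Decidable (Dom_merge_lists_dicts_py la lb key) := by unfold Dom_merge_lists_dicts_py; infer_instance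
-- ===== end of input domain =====

-- B replaces A's global stable sort + itertools.groupby with: sort only the distinct key
-- values, then merge, per key, the matching dicts of la+lb in their original order.
-- Equivalence of the RETURN value is proved on Pre_ (every dict carries the key).

-- ===== PORT A =====
-- dct[key] for a dict given as an association list (total form; Pre_ guarantees presence)
def pvDctKey (key : String) (d : List (String × String)) : String :=
  (PySem.Dict.ofList d).getD key ""

-- d.update(dct)
def pvDctUpd (acc : PySem.Dict String String) (d : List (String × String)) : PySem.Dict String String :=
  acc.update (PySem.Dict.ofList d).items

-- the 'for k, v in itertools.groupby(lst, key=itemgetter(key)):' loop with its inner merge loop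
def pvGroupsA (key : String) : List (List (String × String)) → List (List (String × String))
  | [] => []
  | x :: t =>
      ((x :: t.takeWhile (fun y => pvDctKey key y == pvDctKey key x)).foldl pvDctUpd PySem.Dict.empty).items
        :: pvGroupsA key (t.dropWhile (fun y => pvDctKey key y == pvDctKey key x))
  termination_by l => l.length
  decreasing_by simp only [List.length_cons]; exact Nat.lt_succ_of_le (List.length_dropWhile_le _ _)

def merge_lists_dicts_py (la : List (List (String × String))) (lb : List (List (String × String))) (key : String) : List (List (String × String)) :=
  pvGroupsA key (PySem.List.sorted (la ++ lb) (pvDctKey key) false)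

-- ===== PORT B =====
def merge_lists_dicts_py_alt (la : List (List (String × String))) (lb : List (List (String × String))) (key : String) : List (List (String × String)) :=
  let alld := la ++ lb
  (PySem.List.sorted (PySem.Set.ofList (alld.map (pvDctKey key))) (fun k => k) false).map
    (fun k => (alld.foldl (fun m d => if pvDctKey key d == k then pvDctUpd m d else m) PySem.Dict.empty).items)

-- ===== PRECONDITION & SPEC =====
-- Pre_ excludes exactly the inputs where Python's d[key] raises KeyError (a dict missing the key).
def Pre_merge_lists_dicts_py (la : List (List (String × String))) (lb : List (List (String × String))) (key : String) : Prop :=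
  ∀ d ∈ la ++ lb, (PySem.Dict.ofList d).contains key = true
instance (la : List (List (String × String))) (lb : List (List (String × String))) (key : String) : Decidable (Pre_merge_lists_dicts_py la lb key) := by unfold Pre_merge_lists_dicts_py; infer_instance
def pvWitness_merge_lists_dicts_py : (List (List (String × String))) × (List (List (String × String))) × String :=
  ([[("id", "1"), ("a", "x")]], [[("id", "1"), ("b", "y")], [("id", "2")]], "id")

def Spec_merge_lists_dicts_py (la : List (List (String × String))) (lb : List (List (String × String))) (key : String) (out : List (List (String × String))) : Prop := out = merge_lists_dicts_py_alt la lb key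
instance (la : List (List (String × String))) (lb : List (List (String × String))) (key : String) (out : List (List (String × String))) : Decidable (Spec_merge_lists_dicts_py la lb key out) := by unfold Spec_merge_lists_dicts_py; infer_instance

-- ===== CLAIM (what is proved, stated in full; the proofs are below) =====
def Claim_equal_merge_lists_dicts_py : Prop := ∀ (la : List (List (String × String))) (lb : List (List (String × String))) (key : String), Dom_merge_lists_dicts_py la lb key → Pre_merge_lists_dicts_py la lb key → Spec_merge_lists_dicts_py la lb key (merge_lists_dicts_py la lb key)

-- ===== LEMMAS AND PROOFS =====

-- insertBy into a key-sorted list keeps it key-sorted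
theorem pv_insertBy_pairwise {α : Type} (f : α → String) (x : α) :
    ∀ ys : List α, ys.Pairwise (fun a b => f a ≤ f b) →
    (PySem.List.insertBy (fun a b => decide (f a < f b)) x ys).Pairwise (fun a b => f a ≤ f b) := by
  intro ys
  induction ys with
  | nil => intro _; simp [PySem.List.insertBy]
  | cons y ys ih =>
    intro h
    rw [List.pairwise_cons] at h
    obtain ⟨hy, hys⟩ := h
    by_cases hlt : f x < f y
    · simp only [PySem.List.insertBy, hlt, decide_true, if_pos]
      refine List.Pairwise.cons ?_ (List.Pairwise.cons hy hys)
      intro b hb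
      rcases List.mem_cons.mp hb with rfl | hb
      · exact le_of_lt hlt
      · exact le_trans (le_of_lt hlt) (hy b hb)
    · simp only [PySem.List.insertBy, hlt, decide_false, if_neg, Bool.false_eq_true,
        not_false_iff]
      refine List.Pairwise.cons ?_ (ih hys)
      intro b hb
      rcases (PySem.List.mem_insertBy _ _ _ _).mp hb with rfl | hb
      · exact le_of_not_gt hlt
      · exact hy b hb

-- the per-key trace of an insertBy: a stability step
theorem pv_insertBy_filter {α : Type} (f : α → String) (k : String) (x : α) :
    ∀ ys : List α, ys.Pairwise (fun a b => f a ≤ f b) →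
    (PySem.List.insertBy (fun a b => decide (f a < f b)) x ys).filter (fun a => f a == k) =
      (if f x == k then ys.filter (fun a => f a == k) ++ [x] else ys.filter (fun a => f a == k)) := by
  intro ys
  induction ys with
  | nil =>
    intro _
    by_cases hk : f x = k <;> simp [PySem.List.insertBy, List.filter, hk]
  | cons y ys ih =>
    intro h
    rw [List.pairwise_cons] at h
    obtain ⟨hy, hys⟩ := h
    by_cases hlt : f x < f y
    · simp only [PySem.List.insertBy, hlt, decide_true, if_pos]
      by_cases hk : (f x == k) = true
      · have hxk : f x = k := by simpa using hk
        have hnil : (y :: ys).filter (fun a => f a == k) = [] := by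
          rw [List.filter_eq_nil_iff]
          intro a ha
          have h1 : f y ≤ f a := by
            rcases List.mem_cons.mp ha with rfl | ha
            · exact le_refl _
            · exact hy a ha
          have h2 : k < f a := lt_of_lt_of_le (hxk ▸ hlt) h1
          simpa using (ne_of_gt h2)
        simp [hk, hnil]
      · have hk' : (f x == k) = false := by simpa using hk
        simp [List.filter_cons, hk']
    · simp only [PySem.List.insertBy, hlt, decide_false, if_neg, Bool.false_eq_true,
        not_false_iff]
      rw [List.filter_cons, List.filter_cons, ih hys]
      by_cases hk : (f x == k) = true <;> by_cases hyk : (f y == k) = true <;>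
        simp [hk, hyk]

theorem pv_foldl_insertBy_filter {α : Type} (f : α → String) (k : String) :
    ∀ (xs acc : List α), acc.Pairwise (fun a b => f a ≤ f b) →
    (xs.foldl (fun acc x => PySem.List.insertBy (fun a b => decide (f a < f b)) x acc) acc).filter
        (fun a => f a == k) =
      acc.filter (fun a => f a == k) ++ xs.filter (fun a => f a == k) := by
  intro xs
  induction xs with
  | nil => intro acc _; simp
  | cons x xs ih =>
    intro acc h
    rw [List.foldl_cons, ih _ (pv_insertBy_pairwise f x acc h),
      pv_insertBy_filter f k x acc h, List.filter_cons]
    by_cases hk : (f x == k) = true <;> simp [hk]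

theorem pv_sorted_filter {α : Type} (f : α → String) (k : String) (xs : List α) :
    (PySem.List.sorted xs f false).filter (fun a => f a == k) = xs.filter (fun a => f a == k) := by
  rw [PySem.List.sorted_eq_foldl_insertBy]
  simpa using pv_foldl_insertBy_filter f k xs [] List.Pairwise.nil

-- all elements dropped by dropWhile (== k0) in a sorted list have key > k0
theorem pv_dropWhile_gt {α : Type} (f : α → String) (k0 : String) :
    ∀ t : List α, t.Pairwise (fun a b => f a ≤ f b) → (∀ a ∈ t, k0 ≤ f a) →
    ∀ y ∈ t.dropWhile (fun y => f y == k0), k0 < f y := by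
  intro t
  induction t with
  | nil => intro _ _ y hy; simp at hy
  | cons a t ih =>
    intro h hb
    rw [List.pairwise_cons] at h
    obtain ⟨ha, ht⟩ := h
    by_cases hak : (f a == k0) = true
    · rw [List.dropWhile_cons, if_pos hak]
      exact ih ht (fun b hb' => hb b (List.mem_cons_of_mem a hb'))
    · have hak' : f a ≠ k0 := by simpa using hak
      have hka : k0 < f a := lt_of_le_of_ne (hb a (List.mem_cons_self)) (Ne.symm hak')
      rw [List.dropWhile_cons, if_neg (by simpa using hak)]
      intro y hy
      rcases List.mem_cons.mp hy with rfl | hy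
      · exact hka
      · exact lt_of_lt_of_le hka (ha y hy)

-- the groupby loop over a key-sorted list = map over the sorted distinct keys of per-key merges
theorem pv_groups_eq (key : String) :
    ∀ l : List (List (String × String)), l.Pairwise (fun a b => pvDctKey key a ≤ pvDctKey key b) →
    pvGroupsA key l =
      (PySem.List.sorted (PySem.Set.ofList (l.map (pvDctKey key))) (fun k => k) false).map
        (fun k => ((l.filter (fun d => pvDctKey key d == k)).foldl pvDctUpd PySem.Dict.empty).items) := by
  have main : ∀ (n : Nat) (l : List (List (String × String))), l.length ≤ n →
      l.Pairwise (fun a b => pvDctKey key a ≤ pvDctKey key b) →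
      pvGroupsA key l =
        (PySem.List.sorted (PySem.Set.ofList (l.map (pvDctKey key))) (fun k => k) false).map
          (fun k => ((l.filter (fun d => pvDctKey key d == k)).foldl pvDctUpd PySem.Dict.empty).items) := by
    intro n
    induction n with
    | zero =>
      intro l hl _
      have : l = [] := List.eq_nil_of_length_eq_zero (Nat.le_zero.mp hl)
      subst this
      simp [pvGroupsA]
    | succ n ih =>
      intro l hl h
      match l with
      | [] => simp [pvGroupsA]
      | x :: t =>
        rw [List.pairwise_cons] at h
        obtain ⟨hx, ht⟩ := h
        set f := pvDctKey key with hf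
        set k0 := f x with hk0
        set g := t.takeWhile (fun y => f y == k0) with hgdef
        set r := t.dropWhile (fun y => f y == k0) with hrdef
        have hgr : g ++ r = t := List.takeWhile_append_dropWhile
        have hx' : ∀ y ∈ t, k0 ≤ f y := hx
        have hg : ∀ y ∈ g, f y = k0 := by
          intro y hy
          have := List.mem_takeWhile_imp hy
          simpa using this
        have hr : ∀ y ∈ r, k0 < f y := pv_dropWhile_gt f k0 t ht hx'
        have hrt : ∀ y ∈ r, y ∈ t := fun y hy => (List.dropWhile_sublist _).subset hy
        have hgt : ∀ y ∈ g, y ∈ t := fun y hy => (List.takeWhile_sublist _).subset hy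
        have hrpw : r.Pairwise (fun a b => f a ≤ f b) := by
          rw [← hgr] at ht
          exact (List.pairwise_append.mp ht).2.1
        have hrlen : r.length ≤ n := by
          have h1 : r.length ≤ t.length := List.length_dropWhile_le _ _
          have h2 : t.length + 1 ≤ n + 1 := by simpa using hl
          omega
        set K' := PySem.List.sorted (PySem.Set.ofList (r.map f)) (fun k => k) false with hK'
        have hK'mem : ∀ k ∈ K', ∃ y ∈ r, f y = k := by
          intro k hk
          rw [PySem.List.mem_sorted, PySem.Set.mem_ofList, List.mem_map] at hk
          obtain ⟨y, hy, hyk⟩ := hk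
          exact ⟨y, hy, hyk⟩
        have hK'gt : ∀ k ∈ K', k0 < k := by
          intro k hk
          obtain ⟨y, hy, rfl⟩ := hK'mem k hk
          exact hr y hy
        have hK'nodup : K'.Nodup :=
          (PySem.List.sorted_perm _ _ _).symm.nodup (PySem.Set.nodup_ofList _)
        have hK'pw : K'.Pairwise (· < ·) := PySem.List.sorted_ofList_pairwise_lt _
        have hnodup1 : (k0 :: K').Nodup := by
          refine List.nodup_cons.mpr ⟨?_, hK'nodup⟩
          intro hmem
          exact absurd rfl (ne_of_lt (hK'gt k0 hmem))
        have hsorted_cons :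
            PySem.List.sorted (PySem.Set.ofList ((x :: t).map f)) (fun k => k) false = k0 :: K' := by
          apply PySem.List.sorted_eq_of_perm_of_pairwise_lt
          · rw [List.perm_ext_iff_of_nodup hnodup1 (PySem.Set.nodup_ofList _)]
            intro a
            constructor
            · intro ha
              rw [PySem.Set.mem_ofList, List.mem_map]
              rcases List.mem_cons.mp ha with rfl | ha
              · exact ⟨x, List.mem_cons_self, rfl⟩
              · obtain ⟨y, hy, rfl⟩ := hK'mem a ha
                exact ⟨y, List.mem_cons_of_mem x (hrt y hy), rfl⟩
            · intro ha
              rw [PySem.Set.mem_ofList, List.mem_map] at ha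
              obtain ⟨y, hy, rfl⟩ := ha
              rcases List.mem_cons.mp hy with rfl | hy
              · exact List.mem_cons_self
              · rw [← hgr] at hy
                rcases List.mem_append.mp hy with hy | hy
                · rw [hg y hy]; exact List.mem_cons_self
                · refine List.mem_cons_of_mem _ ?_
                  rw [PySem.List.mem_sorted, PySem.Set.mem_ofList, List.mem_map]
                  exact ⟨y, hy, rfl⟩
          · exact List.Pairwise.cons hK'gt hK'pw
        have hfiltk0 : (x :: t).filter (fun d => f d == k0) = x :: g := by
          rw [List.filter_cons, if_pos (by simp [hk0]), ← hgr, List.filter_append]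
          rw [List.filter_eq_self.mpr (fun y hy => by simpa using hg y hy)]
          rw [List.filter_eq_nil_iff.mpr (fun y hy => by simpa using (ne_of_gt (hr y hy)))]
          simp
        have hfiltk : ∀ k ∈ K', (x :: t).filter (fun d => f d == k) = r.filter (fun d => f d == k) := by
          intro k hk
          have hk0k : k0 < k := hK'gt k hk
          rw [List.filter_cons, if_neg (by simpa using (ne_of_lt hk0k)), ← hgr, List.filter_append]
          rw [List.filter_eq_nil_iff.mpr (fun y hy => by
            simpa using (ne_of_lt ((hg y hy) ▸ hk0k)))]
          simp
        have hrec := ih r hrlen hrpw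
        have hstep : pvGroupsA key (x :: t) =
            (((x :: g).foldl pvDctUpd PySem.Dict.empty).items) :: pvGroupsA key r := by
          rw [pvGroupsA]
        rw [hstep, hsorted_cons, List.map_cons, hfiltk0]
        refine congrArg₂ _ rfl ?_
        have hmapeq :
            K'.map (fun k => ((List.filter (fun d => f d == k) (x :: t)).foldl pvDctUpd PySem.Dict.empty).items)
              = K'.map (fun k => ((List.filter (fun d => f d == k) r).foldl pvDctUpd PySem.Dict.empty).items) :=
          List.map_congr_left (fun k hk => by rw [hfiltk k hk])
        rw [hmapeq, hK']
        exact hrec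
  exact fun l => main l.length l (le_refl _)

-- ===== VERDICT (by name: the statement is the Claim_ definition above) =====
theorem merge_lists_dicts_py_spec : Claim_equal_merge_lists_dicts_py := by
  unfold Claim_equal_merge_lists_dicts_py
  intro la lb key _ _
  unfold Spec_merge_lists_dicts_py merge_lists_dicts_py merge_lists_dicts_py_alt
  set f := pvDctKey key with hf
  set all := la ++ lb with hall
  set s := PySem.List.sorted all f false with hs
  rw [pv_groups_eq key s (PySem.List.sorted_pairwise all f)]
  have hK : PySem.List.sorted (PySem.Set.ofList (s.map f)) (fun k => k) false =
      PySem.List.sorted (PySem.Set.ofList (all.map f)) (fun k => k) false := by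
    apply PySem.List.sorted_eq_sorted_of_perm _ _ _ (fun a b h => h)
    rw [List.perm_ext_iff_of_nodup (PySem.Set.nodup_ofList _) (PySem.Set.nodup_ofList _)]
    intro a
    rw [PySem.Set.mem_ofList, PySem.Set.mem_ofList, List.mem_map, List.mem_map]
    constructor <;> rintro ⟨y, hy, rfl⟩
    · exact ⟨y, (PySem.List.sorted_perm all f false).mem_iff.mp hy, rfl⟩
    · exact ⟨y, (PySem.List.sorted_perm all f false).mem_iff.mpr hy, rfl⟩
  rw [hK]
  apply List.map_congr_left
  intro k _
  rw [pv_sorted_filter f k all, PySem.List.foldl_if_eq_foldl_filter]
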